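-- pv_equiv track=rewrite | github.com/wjdqlsdlsp/coding_test_practice | programmers_all_problems/210807_doll_catch.py | solution
-- ===== SOURCE A (Python) =====
-- from collections import deque
--
-- def solution(board, moves):
--     answer = 0
--     board_size = len(board)
--     board_stack = [deque([]) for _ in range(board_size)]
--     my_stack = deque([])
--     for i in range(board_size):
--         for j in range(board_size):
--             if board[i][j] == 0:
--                 continue
--             board_stack[j].appendleft(board[i][j])
--     for num in moves:
--         if len(board_stack[num-1]) >0:
--             pop_num = board_stack[num-1].pop()
--
--             if len(my_stack) > 0 and my_stack[-1] == pop_num: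
--                 my_stack.pop()
--                 answer +=2
--             else:
--                 my_stack.append(pop_num)
--
--     return answer
-- ===== SOURCE B (Python) =====
-- def solution(board, moves):
--     # Staged decomposition: (1) column-major doll lists, (2) taken-doll sequence via
--     # per-column cursors, (3) pair-cancellation residue; answer = len(taken) - len(residue).
--     n = len(board)
--     cols = [[board[r][c] for r in range(n) if board[r][c] != 0] for c in range(n)]
--     idx = [0] * n
--     taken = []
--     for m in moves:
--         c = m - 1
--         i = idx[c]
--         if i < len(cols[c]):
--             taken.append(cols[c][i])
--             idx[c] = i + 1
--     stack = []
--     for v in taken: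
--         if stack and stack[-1] == v:
--             stack.pop()
--         else:
--             stack.append(v)
--     return len(taken) - len(stack)
-- ===== Notes on version B (the rewrite author's own statement) =====
-- stated objective: alternative
-- what changed: B replaces A's single interleaved pick-and-match loop with three staged passes: build column-major doll lists, extract the full taken-doll sequence with per-column cursors, then pair-cancel that sequence and return len(taken) minus the residue length instead of maintaining an answer counter during the simulation.
import Mathlib
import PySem

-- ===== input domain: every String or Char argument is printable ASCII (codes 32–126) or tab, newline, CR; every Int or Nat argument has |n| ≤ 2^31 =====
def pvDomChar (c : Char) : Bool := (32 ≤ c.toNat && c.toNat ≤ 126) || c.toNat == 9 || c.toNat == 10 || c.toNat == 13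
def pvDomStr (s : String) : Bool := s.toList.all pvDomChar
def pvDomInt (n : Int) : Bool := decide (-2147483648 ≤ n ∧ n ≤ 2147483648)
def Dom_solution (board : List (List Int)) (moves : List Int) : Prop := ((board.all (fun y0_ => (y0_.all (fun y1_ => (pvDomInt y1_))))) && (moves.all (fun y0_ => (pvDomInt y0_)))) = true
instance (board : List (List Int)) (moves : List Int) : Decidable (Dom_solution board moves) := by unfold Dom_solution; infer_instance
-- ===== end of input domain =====

-- B replaces A's interleaved pick-and-match simulation by three staged passes (column lists,
-- taken sequence, pair-cancellation residue); neither program mutates its arguments.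

-- shared tiny helper: Python's `xs[i] = v` (negative i counts from the end)
def pvSetAt {α : Type} (xs : List α) (i : Int) (v : α) : List α :=
  if i < 0 then xs.set ((xs.length : Int) + i).toNat v else xs.set i.toNat v

-- ===== PORT A =====
-- inner loop: `for j in range(board_size): if board[i][j] == 0: continue; board_stack[j].appendleft(board[i][j])`
-- (deque as List, left end = head: appendleft = cons, pop() = last element)
def pvBuildRow (row : List Int) (n : Nat) (bs : List (List Int)) : List (List Int) :=
  (List.range n).foldl (fun bs j =>
    if row.getD j 0 = 0 then bs else bs.set j (row.getD j 0 :: bs.getD j [])) bs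

-- body of `for num in moves:` — state (board_stack, my_stack, answer)
def pvStepA (st : List (List Int) × List Int × Int) (num : Int) : List (List Int) × List Int × Int :=
  if 0 < ((PySem.List.pyGet? st.1 (num - 1)).getD []).length then   -- len(board_stack[num-1]) > 0
    if 0 < st.2.1.length ∧
        st.2.1.getLast?.getD 0 = ((PySem.List.pyGet? st.1 (num - 1)).getD []).getLast?.getD 0 then
      (pvSetAt st.1 (num - 1) ((PySem.List.pyGet? st.1 (num - 1)).getD []).dropLast,
       st.2.1.dropLast, st.2.2 + 2)
    else
      (pvSetAt st.1 (num - 1) ((PySem.List.pyGet? st.1 (num - 1)).getD []).dropLast,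
       st.2.1 ++ [((PySem.List.pyGet? st.1 (num - 1)).getD []).getLast?.getD 0], st.2.2)
  else st

def solution (board : List (List Int)) (moves : List Int) : Int :=
  (moves.foldl pvStepA
    ((List.range board.length).foldl (fun bs i => pvBuildRow (board.getD i []) board.length bs)
      (List.replicate board.length []),
     ([] : List Int), (0 : Int))).2.2

-- ===== PORT B =====
-- stage 1: `cols = [[board[r][c] for r in range(n) if board[r][c] != 0] for c in range(n)]`
-- (indices r, c are in range on Pre_ inputs, so plain getD is exact there)
def pvColsOf (board : List (List Int)) : List (List Int) :=
  (List.range board.length).map (fun c =>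
    (List.range board.length).filterMap (fun r =>
      if (board.getD r []).getD c 0 = 0 then none else some ((board.getD r []).getD c 0)))

-- stage 2 loop body — state (idx, taken)
def pvTake (cols : List (List Int)) (st : List Nat × List Int) (m : Int) : List Nat × List Int :=
  let col := (PySem.List.pyGet? cols (m - 1)).getD []
  let i := (PySem.List.pyGet? st.1 (m - 1)).getD 0
  if i < col.length then (pvSetAt st.1 (m - 1) (i + 1), st.2 ++ [col.getD i 0]) else st

-- stage 3 loop body: cancel against the top of the stack or push
def pvReduce (stack : List Int) (v : Int) : List Int :=
  if 0 < stack.length ∧ stack.getLast?.getD 0 = v then stack.dropLast else stack ++ [v]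

def solution_alt (board : List (List Int)) (moves : List Int) : Int :=
  let taken := (moves.foldl (pvTake (pvColsOf board)) (List.replicate board.length 0, [])).2
  (taken.length : Int) - ((taken.foldl pvReduce []).length : Int)

-- ===== PRECONDITION & SPEC =====
-- Pre_ excludes exactly the inputs where Python A raises IndexError: a row shorter than the
-- board height (board[i][j] fails in the build pass) and a move with num-1 outside [-len, len)
-- (board_stack[num-1] fails).
def Pre_solution (board : List (List Int)) (moves : List Int) : Prop :=
  (∀ row ∈ board, board.length ≤ row.length) ∧
  (∀ m ∈ moves, 1 - (board.length : Int) ≤ m ∧ m ≤ (board.length : Int))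
instance (board : List (List Int)) (moves : List Int) : Decidable (Pre_solution board moves) := by
  unfold Pre_solution; infer_instance

def pvWitness_solution : List (List Int) × List Int :=
  ([[0, 1], [1, 2]], [1, 2, 2, 1])

def Spec_solution (board : List (List Int)) (moves : List Int) (out : Int) : Prop := out = solution_alt board moves
instance (board : List (List Int)) (moves : List Int) (out : Int) : Decidable (Spec_solution board moves out) := by unfold Spec_solution; infer_instance

-- ===== CLAIM (what is proved, stated in full; the proofs are below) =====
def Claim_equal_solution : Prop := ∀ (board : List (List Int)) (moves : List Int), Dom_solution board moves → Pre_solution board moves → Spec_solution board moves (solution board moves)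

-- ===== LEMMAS AND PROOFS =====

-- the dolls of column c, top to bottom
def colList (board : List (List Int)) (c : Nat) : List Int :=
  board.filterMap (fun row => if row.getD c 0 = 0 then none else some (row.getD c 0))

theorem pvBuildRow_aux (row : List Int) (m : Nat) (bs : List (List Int)) (hm : m ≤ bs.length) :
    ((List.range m).foldl (fun bs j =>
        if row.getD j 0 = 0 then bs else bs.set j (row.getD j 0 :: bs.getD j [])) bs).length = bs.length ∧
    (∀ c, m ≤ c → ((List.range m).foldl (fun bs j =>
        if row.getD j 0 = 0 then bs else bs.set j (row.getD j 0 :: bs.getD j [])) bs).getD c [] = bs.getD c []) ∧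
    (∀ c, c < m → ((List.range m).foldl (fun bs j =>
        if row.getD j 0 = 0 then bs else bs.set j (row.getD j 0 :: bs.getD j [])) bs).getD c [] =
          (if row.getD c 0 = 0 then bs.getD c [] else row.getD c 0 :: bs.getD c [])) := by
  induction m with
  | zero => simp
  | succ m ih =>
    obtain ⟨hlen, hge, hlt⟩ := ih (Nat.le_of_succ_le hm)
    rw [List.range_succ, List.foldl_append, List.foldl_cons, List.foldl_nil]
    set out := (List.range m).foldl (fun bs j =>
        if row.getD j 0 = 0 then bs else bs.set j (row.getD j 0 :: bs.getD j [])) bs with hout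
    have hmlen : m < out.length := by omega
    by_cases hv : row.getD m 0 = 0
    · rw [if_pos hv]
      refine ⟨hlen, fun c hc => hge c (by omega), fun c hc => ?_⟩
      rcases Nat.lt_or_ge c m with h | h
      · exact hlt c h
      · have hcm : c = m := by omega
        subst hcm
        rw [if_pos hv]
        exact hge c le_rfl
    · rw [if_neg hv]
      refine ⟨by simp [hlen], fun c hc => ?_, fun c hc => ?_⟩
      · rw [List.getD_eq_getElem?_getD, List.getElem?_set_ne (by omega), ← List.getD_eq_getElem?_getD]
        exact hge c (by omega)
      · rcases Nat.lt_or_ge c m with h | h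
        · rw [List.getD_eq_getElem?_getD, List.getElem?_set_ne (by omega), ← List.getD_eq_getElem?_getD]
          exact hlt c h
        · have hcm : c = m := by omega
          subst hcm
          rw [if_neg hv, List.getD_eq_getElem?_getD, List.getElem?_set_self hmlen]
          simpa [List.getD_eq_getElem?_getD] using hge c le_rfl

theorem pvBuild_col (rows : List (List Int)) (n : Nat)
    (bs : List (List Int)) (h : bs.length = n) (c : Nat) (hc : c < n) :
    (rows.foldl (fun bs row => pvBuildRow row n bs) bs).length = n ∧
    (rows.foldl (fun bs row => pvBuildRow row n bs) bs).getD c [] =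
      (rows.filterMap (fun row => if row.getD c 0 = 0 then none else some (row.getD c 0))).reverse
        ++ bs.getD c [] := by
  induction rows generalizing bs with
  | nil => simpa using h
  | cons row rows ih =>
    obtain ⟨hlen1, _, hlt1⟩ := pvBuildRow_aux row n bs (by omega)
    have hlen1' : (pvBuildRow row n bs).length = n := by rw [pvBuildRow, hlen1, h]
    obtain ⟨hlen2, hcol2⟩ := ih (pvBuildRow row n bs) hlen1'
    rw [List.foldl_cons]
    refine ⟨hlen2, ?_⟩
    rw [hcol2, List.filterMap_cons]
    have hrowc : (pvBuildRow row n bs).getD c [] =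
        (if row.getD c 0 = 0 then bs.getD c [] else row.getD c 0 :: bs.getD c []) := hlt1 c hc
    by_cases hv : row.getD c 0 = 0
    · rw [if_pos hv] at hrowc
      rw [if_pos hv, hrowc]
    · rw [if_neg hv] at hrowc
      rw [if_neg hv, hrowc]
      simp

-- normalised Python index: xs[i] for -len ≤ i < len
theorem pvGet_norm {α : Type} (xs : List α) (i : Int)
    (h1 : -(xs.length : Int) ≤ i) (_h2 : i < (xs.length : Int)) :
    PySem.List.pyGet? xs i = xs[(if i < 0 then (xs.length : Int) + i else i).toNat]? := by
  by_cases h : i < 0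
  · rw [if_pos h]
    have hk : i = -(((-i).toNat : Int)) := by omega
    rw [hk, PySem.List.pyGet?_neg_natCast xs (-i).toNat (by omega) (by omega)]
    congr 1
    omega
  · rw [if_neg h, PySem.List.pyGet?_of_nonneg xs (by omega)]

theorem pv_map_getD_range {α : Type} (l : List α) (d : α) :
    (List.range l.length).map (fun i => l.getD i d) = l := by
  apply List.ext_getElem
  · simp
  · intro i h1 h2
    simp only [List.getElem_map, List.getElem_range]
    exact List.getD_eq_getElem l d h2

theorem pvColsOf_getD (board : List (List Int)) (c : Nat) (hc : c < board.length) :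
    (pvColsOf board).length = board.length ∧
    (pvColsOf board).getD c [] = colList board c := by
  constructor
  · simp [pvColsOf]
  · rw [pvColsOf, List.getD_eq_getElem?_getD, List.getElem?_map, List.getElem?_range hc]
    simp only [Option.map_some, Option.getD_some]
    rw [colList]
    conv_rhs => rw [← pv_map_getD_range board ([] : List Int)]
    rw [List.filterMap_map]
    rfl

theorem pv_rev_drop_getLast (l : List Int) (i : Nat) :
    ((l.drop i).reverse).getLast?.getD 0 = l.getD i 0 := by
  rw [List.getLast?_reverse, List.head?_drop, List.getD_eq_getElem?_getD]

theorem pv_rev_drop_dropLast (l : List Int) (i : Nat) :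
    ((l.drop i).reverse).dropLast = (l.drop (i + 1)).reverse := by
  have h : l.drop (i + 1) = ((l.drop i).reverse.dropLast).reverse := by
    rw [← List.tail_drop, ← List.tail_reverse, List.reverse_reverse]
  rw [h, List.reverse_reverse]

theorem pv_foldl_range_getD {α β : Type} (l : List α) (d : α) (f : β → α → β) :
    ∀ (init : β),
    (List.range l.length).foldl (fun b i => f b (l.getD i d)) init = l.foldl f init := by
  induction l with
  | nil => intro init; simp
  | cons x t ih =>
    intro init
    simp only [List.length_cons, List.range_succ_eq_map, List.foldl_cons, List.foldl_map,
      List.getD_cons_zero, List.getD_cons_succ]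
    exact ih (f init x)

theorem pvBuildRow_len (row : List Int) (n : Nat) (bs : List (List Int)) :
    (pvBuildRow row n bs).length = bs.length := by
  rw [pvBuildRow]
  generalize List.range n = l
  induction l generalizing bs with
  | nil => rfl
  | cons j l ih =>
    rw [List.foldl_cons]
    by_cases hv : row.getD j 0 = 0
    · rw [if_pos hv]; exact ih bs
    · rw [if_neg hv, ih]; simp

theorem pvBuild_len (rows : List (List Int)) (n : Nat) (bs : List (List Int)) :
    (rows.foldl (fun bs row => pvBuildRow row n bs) bs).length = bs.length := by
  induction rows generalizing bs with
  | nil => rfl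
  | cons row rows ih => rw [List.foldl_cons, ih, pvBuildRow_len]

-- one move keeps the correspondence between A's (deques, stack, counter) and B's (cursors, taken)
theorem pvStep_equiv (board : List (List Int)) (num : Int)
    (hmv : 1 - (board.length : Int) ≤ num ∧ num ≤ (board.length : Int))
    (bs : List (List Int)) (idx : List Nat) (my tk : List Int) (ans : Int)
    (hbs : bs.length = board.length) (hidx : idx.length = board.length)
    (hcol : ∀ c < board.length, bs.getD c [] = ((colList board c).drop (idx.getD c 0)).reverse)
    (hmy : my = tk.foldl pvReduce [])
    (hans : ans = (tk.length : Int) - (my.length : Int)) :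
    (pvStepA (bs, my, ans) num).1.length = board.length ∧
    (pvTake (pvColsOf board) (idx, tk) num).1.length = board.length ∧
    (∀ c < board.length, (pvStepA (bs, my, ans) num).1.getD c [] =
      ((colList board c).drop
        ((pvTake (pvColsOf board) (idx, tk) num).1.getD c 0)).reverse) ∧
    (pvStepA (bs, my, ans) num).2.1 =
      (pvTake (pvColsOf board) (idx, tk) num).2.foldl pvReduce [] ∧
    (pvStepA (bs, my, ans) num).2.2 =
      ((pvTake (pvColsOf board) (idx, tk) num).2.length : Int) -
        (((pvTake (pvColsOf board) (idx, tk) num).2.foldl pvReduce []).length : Int) := by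
  set cn := (if num - 1 < 0 then (board.length : Int) + (num - 1) else num - 1).toNat with hcn
  have hclt : cn < board.length := by omega
  obtain ⟨hclen, hcget⟩ := pvColsOf_getD board cn hclt
  have hgetbs : (PySem.List.pyGet? bs (num - 1)).getD [] = bs.getD cn [] := by
    rw [pvGet_norm bs (num - 1) (by omega) (by omega), List.getD_eq_getElem?_getD]
    congr 2
    omega
  have hgetcols : (PySem.List.pyGet? (pvColsOf board) (num - 1)).getD [] = colList board cn := by
    have hidxeq :
        (if num - 1 < 0 then ((pvColsOf board).length : Int) + (num - 1) else num - 1).toNat = cn := by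
      rw [hclen, hcn]
    rw [pvGet_norm (pvColsOf board) (num - 1) (by rw [hclen]; omega) (by rw [hclen]; omega),
      hidxeq, ← hcget, List.getD_eq_getElem?_getD]
  have hgetidx : (PySem.List.pyGet? idx (num - 1)).getD 0 = idx.getD cn 0 := by
    rw [pvGet_norm idx (num - 1) (by omega) (by omega), List.getD_eq_getElem?_getD]
    congr 2
    omega
  have hsetA : ∀ (x : List Int), pvSetAt bs (num - 1) x = bs.set cn x := by
    intro x
    rw [pvSetAt]
    split_ifs with h
    · congr 1; omega
    · congr 1; omega
  have hsetB : ∀ (x : Nat), pvSetAt idx (num - 1) x = idx.set cn x := by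
    intro x
    rw [pvSetAt]
    split_ifs with h
    · congr 1; omega
    · congr 1; omega
  set i := idx.getD cn 0 with hi
  set col := colList board cn with hcoldef
  have hL : bs.getD cn [] = (col.drop i).reverse := hcol cn hclt
  by_cases hin : i < col.length
  · -- a doll is taken
    have hAne : 0 < ((PySem.List.pyGet? bs (num - 1)).getD []).length := by
      rw [hgetbs, hL]
      simp only [List.length_reverse, List.length_drop]
      omega
    have hvA : ((PySem.List.pyGet? bs (num - 1)).getD []).getLast?.getD 0 = col.getD i 0 := by
      rw [hgetbs, hL, pv_rev_drop_getLast]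
    have hdlA : ((PySem.List.pyGet? bs (num - 1)).getD []).dropLast = (col.drop (i + 1)).reverse := by
      rw [hgetbs, hL, pv_rev_drop_dropLast]
    have hB : pvTake (pvColsOf board) (idx, tk) num =
        (idx.set cn (i + 1), tk ++ [col.getD i 0]) := by
      rw [pvTake]
      simp only [hgetcols, hgetidx, if_pos hin, hsetB]
    have hinv : ∀ c < board.length, (bs.set cn (col.drop (i + 1)).reverse).getD c [] =
        ((colList board c).drop ((idx.set cn (i + 1)).getD c 0)).reverse := by
      intro c hc
      by_cases hcc : c = cn
      · subst hcc
        rw [List.getD_eq_getElem?_getD, List.getElem?_set_self (by omega), Option.getD_some,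
          List.getD_eq_getElem?_getD, List.getElem?_set_self (by omega), Option.getD_some, hcoldef]
      · rw [List.getD_eq_getElem?_getD, List.getElem?_set_ne (fun h => hcc h.symm),
          ← List.getD_eq_getElem?_getD, List.getD_eq_getElem?_getD (l := idx.set cn (i + 1)),
          List.getElem?_set_ne (fun h => hcc h.symm), ← List.getD_eq_getElem?_getD]
        exact hcol c hc
    have hmy' : pvReduce my (col.getD i 0) = (tk ++ [col.getD i 0]).foldl pvReduce [] := by
      rw [List.foldl_append, List.foldl_cons, List.foldl_nil, hmy]
    rw [hB]
    by_cases hbr : 0 < my.length ∧ my.getLast?.getD 0 = col.getD i 0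
    · have hA : pvStepA (bs, my, ans) num =
          (bs.set cn (col.drop (i + 1)).reverse, my.dropLast, ans + 2) := by
        rw [pvStepA, if_pos hAne, if_pos (by rw [hvA]; exact hbr), hdlA, hsetA]
      rw [hA]
      have hred : pvReduce my (col.getD i 0) = my.dropLast := by rw [pvReduce, if_pos hbr]
      refine ⟨by simpa using hbs, by simpa using hidx, hinv, by rw [← hmy', hred], ?_⟩
      rw [← hmy', hred]
      have h0 : 0 < my.length := hbr.1
      simp only [List.length_append, List.length_cons, List.length_nil, List.length_dropLast]
      push_cast
      omega
    · have hA : pvStepA (bs, my, ans) num =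
          (bs.set cn (col.drop (i + 1)).reverse, my ++ [col.getD i 0], ans) := by
        rw [pvStepA, if_pos hAne, if_neg (by rw [hvA]; exact hbr), hdlA, hvA, hsetA]
      rw [hA]
      have hred : pvReduce my (col.getD i 0) = my ++ [col.getD i 0] := by rw [pvReduce, if_neg hbr]
      refine ⟨by simpa using hbs, by simpa using hidx, hinv, by rw [← hmy', hred], ?_⟩
      rw [← hmy', hred]
      simp only [List.length_append, List.length_cons, List.length_nil]
      push_cast
      omega
  · -- column exhausted: both sides skip the move
    have hA0 : pvStepA (bs, my, ans) num = (bs, my, ans) := by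
      rw [pvStepA, if_neg]
      rw [hgetbs, hL]
      simp only [List.length_reverse, List.length_drop]
      omega
    have hB0 : pvTake (pvColsOf board) (idx, tk) num = (idx, tk) := by
      rw [pvTake]
      simp only [hgetcols, hgetidx, if_neg hin]
    rw [hA0, hB0]
    exact ⟨hbs, hidx, hcol, hmy, by rw [hans, hmy]⟩

theorem pv_main (board : List (List Int)) (moves : List Int)
    (hm : ∀ m ∈ moves, 1 - (board.length : Int) ≤ m ∧ m ≤ (board.length : Int))
    (bs : List (List Int)) (idx : List Nat) (my tk : List Int) (ans : Int)
    (hbs : bs.length = board.length) (hidx : idx.length = board.length)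
    (hcol : ∀ c < board.length, bs.getD c [] = ((colList board c).drop (idx.getD c 0)).reverse)
    (hmy : my = tk.foldl pvReduce [])
    (hans : ans = (tk.length : Int) - (my.length : Int)) :
    (moves.foldl pvStepA (bs, my, ans)).2.2 =
      (((moves.foldl (pvTake (pvColsOf board)) (idx, tk)).2.length : Int) -
        (((moves.foldl (pvTake (pvColsOf board)) (idx, tk)).2.foldl pvReduce []).length : Int)) := by
  induction moves generalizing bs idx my tk ans with
  | nil =>
    rw [hmy] at hans
    simpa using hans
  | cons num moves ih =>
    obtain ⟨ha, hb, hc, hd, he⟩ :=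
      pvStep_equiv board num (hm num List.mem_cons_self) bs idx my tk ans hbs hidx hcol hmy hans
    rw [List.foldl_cons, List.foldl_cons,
      show pvStepA (bs, my, ans) num =
        ((pvStepA (bs, my, ans) num).1, (pvStepA (bs, my, ans) num).2.1,
         (pvStepA (bs, my, ans) num).2.2) from rfl,
      show pvTake (pvColsOf board) (idx, tk) num =
        ((pvTake (pvColsOf board) (idx, tk) num).1,
         (pvTake (pvColsOf board) (idx, tk) num).2) from rfl]
    rw [← hd] at he
    exact ih (fun m hmem => hm m (List.mem_cons_of_mem _ hmem)) _ _ _ _ _ ha hb hc hd he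

-- ===== VERDICT (by name: the statement is the Claim_ definition above) =====
theorem solution_spec : Claim_equal_solution := by
  intro board moves _ hpre
  obtain ⟨hrows, hmoves⟩ := hpre
  unfold Spec_solution solution solution_alt
  rw [pv_foldl_range_getD board [] (fun bs row => pvBuildRow row board.length bs)]
  refine pv_main board moves hmoves _ _ [] [] 0 ?_ ?_ ?_ rfl rfl
  · rw [pvBuild_len]; simp
  · simp
  · intro c hc
    obtain ⟨_, hcol⟩ := pvBuild_col board board.length (List.replicate board.length []) (by simp) c hc
    rw [hcol]
    have hrepl : (List.replicate board.length ([] : List Int)).getD c [] = [] := by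
      rw [List.getD_eq_getElem?_getD, List.getElem?_replicate]
      by_cases h : c < board.length <;> simp [h]
    have hidx0 : (List.replicate board.length (0 : Nat)).getD c 0 = 0 := by
      rw [List.getD_eq_getElem?_getD, List.getElem?_replicate]
      by_cases h : c < board.length <;> simp [h]
    rw [hrepl, hidx0, List.append_nil, colList, List.drop_zero]
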